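-- pv_equiv track=rewrite | github.com/pypi-data/pypi-mirror-68 | packages/pesummary/pesummary-0.5.4.tar.gz/pesummary-0.5.4/pesummary/core/file/read.py | _check_pesummary_file
-- ===== SOURCE A (Python) =====
-- def _check_pesummary_file(f):
--     """Check the contents of a dictionary to see if it is a pesummary dictionary
--
--     Parameters
--     ----------
--     f: dict
--         dictionary of the contents of the file
--     """
--     labels = f.keys()
--     if "version" not in labels:
--         return False
--     try:
--         if all(
--                 "posterior_samples" in f[label].keys() for label in labels if
--                 label != "version"
--         ):
--             return True
--         elif all(
--                 "mcmc_chains" in f[label].keys() for label in labels if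
--                 label != "version"
--         ):
--             return True
--         else:
--             return False
--     except Exception:
--         return False
-- ===== SOURCE B (Python) =====
-- def _check_pesummary_file(f):
--     """Single pass maintaining two flags instead of two sequential all(...) scans."""
--     if "version" not in f.keys():
--         return False
--     has_post = True
--     has_mcmc = True
--     try:
--         for label in f.keys():
--             if label == "version":
--                 continue
--             keys = f[label].keys()
--             if "posterior_samples" not in keys:
--                 has_post = False
--             if "mcmc_chains" not in keys:
--                 has_mcmc = False
--     except Exception:
--         return False
--     return has_post or has_mcmc
-- ===== Notes on version B (the rewrite author's own statement) =====
-- stated objective: alternative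
-- what changed: Replaces the two sequential all(...) generator scans (each re-iterating the labels) with a single loop over the labels that maintains two boolean flags and returns their disjunction.
import Mathlib
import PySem

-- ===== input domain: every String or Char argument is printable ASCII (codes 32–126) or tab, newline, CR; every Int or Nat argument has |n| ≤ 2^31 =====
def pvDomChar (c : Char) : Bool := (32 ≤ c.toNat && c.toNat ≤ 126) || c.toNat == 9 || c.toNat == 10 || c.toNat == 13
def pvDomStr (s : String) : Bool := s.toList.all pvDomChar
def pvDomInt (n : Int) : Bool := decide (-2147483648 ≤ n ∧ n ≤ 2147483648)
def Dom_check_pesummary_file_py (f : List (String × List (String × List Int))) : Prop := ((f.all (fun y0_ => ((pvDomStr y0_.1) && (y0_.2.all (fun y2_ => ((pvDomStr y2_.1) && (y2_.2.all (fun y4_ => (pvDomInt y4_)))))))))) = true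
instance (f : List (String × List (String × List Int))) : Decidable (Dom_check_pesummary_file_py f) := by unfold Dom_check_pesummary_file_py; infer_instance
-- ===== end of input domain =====

-- B changes the decomposition (one flag-maintaining loop instead of two sequential all(...) scans); same cost.

-- ===== PORT A =====
-- f is a dict: labels = distinct keys in insertion order; f[label] = first-match lookup
-- (always succeeds since label ∈ keys, so the Python's try/except never fires and ports are total).
def check_pesummary_file_py (f : List (String × List (String × List Int))) : Bool :=
  let labels := PySem.List.dedup (f.map Prod.fst)
  if !labels.contains "version" then false
  else if (labels.filter (fun l => l != "version")).all
      (fun label => (((f.lookup label).getD []).map Prod.fst).contains "posterior_samples") then true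
  else if (labels.filter (fun l => l != "version")).all
      (fun label => (((f.lookup label).getD []).map Prod.fst).contains "mcmc_chains") then true
  else false

-- ===== PORT B =====
def check_pesummary_file_py_alt (f : List (String × List (String × List Int))) : Bool :=
  let labels := PySem.List.dedup (f.map Prod.fst)
  if !labels.contains "version" then false
  else
    let st := labels.foldl
      (fun (st : Bool × Bool) label =>
        if label == "version" then st
        else
          let keys := ((f.lookup label).getD []).map Prod.fst
          (st.1 && keys.contains "posterior_samples", st.2 && keys.contains "mcmc_chains"))
      (true, true)
    st.1 || st.2

-- ===== PRECONDITION & SPEC =====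
def Spec_check_pesummary_file_py (f : List (String × List (String × List Int))) (out : Bool) : Prop := out = check_pesummary_file_py_alt f
instance (f : List (String × List (String × List Int))) (out : Bool) : Decidable (Spec_check_pesummary_file_py f out) := by unfold Spec_check_pesummary_file_py; infer_instance

-- ===== CLAIM (what is proved, stated in full; the proofs are below) =====
def Claim_equal_check_pesummary_file_py : Prop := ∀ (f : List (String × List (String × List Int))), Dom_check_pesummary_file_py f → Spec_check_pesummary_file_py f (check_pesummary_file_py f)

-- ===== LEMMAS AND PROOFS =====

-- B's single flag loop computes the two filtered-all scans of A (with the initial flags and-ed in).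
theorem foldl_flags (P Q : String → Bool) (ls : List String) (a b : Bool) :
    ls.foldl
      (fun (st : Bool × Bool) label =>
        if label == "version" then st else (st.1 && P label, st.2 && Q label))
      (a, b)
    = (a && (ls.filter (fun l => l != "version")).all P,
       b && (ls.filter (fun l => l != "version")).all Q) := by
  induction ls generalizing a b with
  | nil => simp
  | cons x xs ih =>
    rw [List.foldl_cons]
    by_cases hx : x = "version"
    · rw [if_pos (by simp [hx]), ih]; simp [hx]
    · rw [if_neg (by simp [hx]), ih]; simp [hx, Bool.and_assoc]

-- ===== VERDICT (by name: the statement is the Claim_ definition above) =====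
theorem check_pesummary_file_py_spec : Claim_equal_check_pesummary_file_py := by
  intro f _
  unfold Spec_check_pesummary_file_py check_pesummary_file_py check_pesummary_file_py_alt
  simp only [foldl_flags, Bool.true_and]
  split_ifs <;> simp_all <;> tauto
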